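-- pv_equiv track=rewrite | github.com/RossLabCSU/PLOS_ComputationalBiology_2024 | get_HQprot_NonOverlapping_QX-XQ-HX-XH_LCD_proteins.py | crosscheck_bounds
-- ===== SOURCE A (Python) =====
-- def crosscheck_bounds(hq_df, allQ_df):
--
--     contains_nonoverlap_Q_df = {}
--     for proteome in hq_df:
--         contains_nonoverlap_Q_df[proteome] = contains_nonoverlap_Q_df.get(proteome, set())
--         for prot in hq_df[proteome]:
--             hq_positions = []
--             for bounds in hq_df[proteome][prot]:
--                 hq_positions += [x for x in range(bounds[0], bounds[1]+1)]
--
--             for lcd_class in allQ_df: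
--                 if proteome not in allQ_df[lcd_class]:
--                     continue
--
--                 if prot in allQ_df[lcd_class][proteome]:
--                     q_only_positions = []
--                     for qbounds in allQ_df[lcd_class][proteome][prot]:
--                         all_positions = [x for x in range(qbounds[0], qbounds[1]+1)]
--                         non_hq_positions = [x for x in all_positions if x not in hq_positions]
--                         q_only_positions += non_hq_positions
--                     if len(q_only_positions) > 20:
--                         contains_nonoverlap_Q_df[proteome].add(prot)
--
--     return contains_nonoverlap_Q_df
-- ===== SOURCE B (Python) =====
-- def crosscheck_bounds(hq_df, allQ_df):
--     return {proteome: {prot for prot, bounds in prots.items()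
--                        if _has_long_nonHQ(proteome, prot, _merged(bounds), allQ_df)}
--             for proteome, prots in hq_df.items()}
--
-- def _merged(bounds):
--     # union of the HQ intervals as a sorted list of disjoint, non-adjacent intervals
--     merged = []
--     for a, b in sorted((p for p in bounds if p[0] <= p[1]), key=lambda p: p[0]):
--         if merged and a <= merged[-1][1] + 1:
--             c, d = merged[-1]
--             if b > d:
--                 merged[-1] = (c, b)
--         else:
--             merged.append((a, b))
--     return merged
--
-- def _has_long_nonHQ(proteome, prot, merged, allQ_df):
--     for class_df in allQ_df.values():
--         prot_df = class_df.get(proteome)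
--         if prot_df is None or prot not in prot_df:
--             continue
--         total = 0
--         for a, b in prot_df[prot]:
--             if a <= b:
--                 total += b - a + 1
--                 for c, d in merged:
--                     if c <= b and a <= d:
--                         total -= min(b, d) - max(a, c) + 1
--         if total > 20:
--             return True
--     return False
-- ===== Notes on version B (the rewrite author's own statement) =====
-- stated objective: alternative
-- what changed: B never enumerates positions: it merges the HQ bounds into a sorted union of disjoint intervals and computes each Q-interval's non-HQ count arithmetically (interval length minus summed overlap with the merged union), instead of A's building explicit HQ/Q position lists and membership-scanning each Q position against all HQ positions.
import Mathlib
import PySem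

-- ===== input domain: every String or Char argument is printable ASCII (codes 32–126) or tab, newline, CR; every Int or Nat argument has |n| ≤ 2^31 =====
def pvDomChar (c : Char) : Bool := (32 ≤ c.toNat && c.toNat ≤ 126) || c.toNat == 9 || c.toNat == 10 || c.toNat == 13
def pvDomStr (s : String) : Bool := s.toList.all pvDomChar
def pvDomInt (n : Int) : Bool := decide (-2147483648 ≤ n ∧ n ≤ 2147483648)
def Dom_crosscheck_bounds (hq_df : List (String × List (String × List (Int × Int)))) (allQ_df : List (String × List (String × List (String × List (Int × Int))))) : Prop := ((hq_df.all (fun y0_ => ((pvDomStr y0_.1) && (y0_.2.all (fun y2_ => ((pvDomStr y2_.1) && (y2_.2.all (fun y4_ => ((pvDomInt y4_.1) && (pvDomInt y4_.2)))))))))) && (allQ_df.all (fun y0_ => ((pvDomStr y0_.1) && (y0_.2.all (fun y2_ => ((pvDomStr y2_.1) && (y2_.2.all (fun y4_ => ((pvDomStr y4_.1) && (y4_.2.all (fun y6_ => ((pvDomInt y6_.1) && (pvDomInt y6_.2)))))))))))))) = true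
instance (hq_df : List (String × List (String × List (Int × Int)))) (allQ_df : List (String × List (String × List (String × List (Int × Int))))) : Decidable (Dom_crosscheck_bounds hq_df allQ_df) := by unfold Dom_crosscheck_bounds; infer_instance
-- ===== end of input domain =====

-- B replaces A's per-position enumeration (building and scanning explicit position
-- lists) by interval arithmetic on the merged union of the HQ bounds; objective: an
-- alternative algorithm computing exactly the same result.

-- ===== PORT A =====
def crosscheck_bounds (hq_df : List (String × List (String × List (Int × Int)))) (allQ_df : List (String × List (String × List (String × List (Int × Int))))) : List (String × List String) :=
  (hq_df.foldl (fun acc pr =>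
    let acc1 := acc.insert pr.1 (acc.getD pr.1 [])
    pr.2.foldl (fun acc2 pp =>
      let hq_positions : List Int :=
        pp.2.foldl (fun h b => h ++ PySem.List.pyRange b.1 (b.2 + 1) 1) []
      allQ_df.foldl (fun acc3 lc =>
        match (PySem.Dict.mk lc.2).get? pr.1 with
        | none => acc3
        | some pm =>
          match (PySem.Dict.mk pm).get? pp.1 with
          | none => acc3
          | some qlist =>
            let q_only := qlist.foldl (fun q qb =>
              q ++ (PySem.List.pyRange qb.1 (qb.2 + 1) 1).filter
                    (fun x => !(hq_positions.contains x))) []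
            if q_only.length > 20 then
              acc3.modify pr.1 [] (fun s => PySem.Set.add s pp.1)
            else acc3) acc2) acc1)
    (PySem.Dict.mk ([] : List (String × List String)))).items

-- ===== PORT B =====
-- union of the HQ intervals as a sorted list of disjoint, non-adjacent intervals
def pvMerged (bounds : List (Int × Int)) : List (Int × Int) :=
  (PySem.List.sorted (bounds.filter (fun p => decide (p.1 ≤ p.2))) (fun p => p.1) false).foldl
    (fun m p =>
      match m.getLast? with
      | some q =>
        if p.1 ≤ q.2 + 1 then (if q.2 < p.2 then m.dropLast ++ [(q.1, p.2)] else m)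
        else m ++ [p]
      | none => m ++ [p]) []

def pvHasLongNonHQ (proteome prot : String) (merged : List (Int × Int))
    (allQ_df : List (String × List (String × List (String × List (Int × Int))))) : Bool :=
  allQ_df.any (fun lc =>
    match (PySem.Dict.mk lc.2).get? proteome with
    | none => false
    | some pm =>
      match (PySem.Dict.mk pm).get? prot with
      | none => false
      | some qlist =>
        decide (20 < qlist.foldl (fun total qb =>
          if qb.1 ≤ qb.2 then
            merged.foldl (fun t p =>
              if p.1 ≤ qb.2 ∧ qb.1 ≤ p.2 then t - (min qb.2 p.2 - max qb.1 p.1 + 1) else t)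
              (total + (qb.2 - qb.1 + 1))
          else total) (0 : Int)))

def crosscheck_bounds_alt (hq_df : List (String × List (String × List (Int × Int)))) (allQ_df : List (String × List (String × List (String × List (Int × Int))))) : List (String × List String) :=
  hq_df.map (fun pr => (pr.1,
    PySem.Set.ofList ((pr.2.filter
      (fun pp => pvHasLongNonHQ pr.1 pp.1 (pvMerged pp.2) allQ_df)).map (·.1))))

-- ===== PRECONDITION & SPEC =====
-- Pre_ excludes association lists with duplicate keys at any dict level, on which the
-- Python dict literal silently collapses entries (last value wins) and the assoc-list
-- reading is ambiguous; it excludes nothing else.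
def Pre_crosscheck_bounds (hq_df : List (String × List (String × List (Int × Int)))) (allQ_df : List (String × List (String × List (String × List (Int × Int))))) : Prop :=
  (hq_df.map (·.1)).Nodup ∧ (∀ pr ∈ hq_df, (pr.2.map (·.1)).Nodup) ∧
  (allQ_df.map (·.1)).Nodup ∧
  (∀ lc ∈ allQ_df, (lc.2.map (·.1)).Nodup ∧ ∀ pm ∈ lc.2, (pm.2.map (·.1)).Nodup)
instance (hq_df : List (String × List (String × List (Int × Int)))) (allQ_df : List (String × List (String × List (String × List (Int × Int))))) : Decidable (Pre_crosscheck_bounds hq_df allQ_df) := by unfold Pre_crosscheck_bounds; infer_instance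

def pvWitness_crosscheck_bounds : (List (String × List (String × List (Int × Int)))) × (List (String × List (String × List (String × List (Int × Int))))) :=
  ([("p", [("a", [(1, 5)])])], [("c", [("p", [("a", [(1, 30)])])])])

def Spec_crosscheck_bounds (hq_df : List (String × List (String × List (Int × Int)))) (allQ_df : List (String × List (String × List (String × List (Int × Int))))) (out : List (String × List String)) : Prop := out = crosscheck_bounds_alt hq_df allQ_df
instance (hq_df : List (String × List (String × List (Int × Int)))) (allQ_df : List (String × List (String × List (String × List (Int × Int))))) (out : List (String × List String)) : Decidable (Spec_crosscheck_bounds hq_df allQ_df out) := by unfold Spec_crosscheck_bounds; infer_instance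

-- ===== CLAIM (what is proved, stated in full; the proofs are below) =====
def Claim_equal_crosscheck_bounds : Prop := ∀ (hq_df : List (String × List (String × List (Int × Int)))) (allQ_df : List (String × List (String × List (String × List (Int × Int))))), Dom_crosscheck_bounds hq_df allQ_df → Pre_crosscheck_bounds hq_df allQ_df → Spec_crosscheck_bounds hq_df allQ_df (crosscheck_bounds hq_df allQ_df)

-- ===== LEMMAS AND PROOFS =====

-- membership in the union of a list of (inclusive) integer intervals
def pvInU (x : Int) (M : List (Int × Int)) : Prop := ∃ p ∈ M, p.1 ≤ x ∧ x ≤ p.2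

-- a "good" interval list: valid bounds, strictly separated, left to right
def pvGood (M : List (Int × Int)) : Prop :=
  M.Pairwise (fun p q => p.2 + 1 < q.1) ∧ ∀ p ∈ M, p.1 ≤ p.2

-- the step of pvMerged's fold, named for the proofs
def pvMergeStep (m : List (Int × Int)) (p : Int × Int) : List (Int × Int) :=
  match m.getLast? with
  | some q =>
    if p.1 ≤ q.2 + 1 then (if q.2 < p.2 then m.dropLast ++ [(q.1, p.2)] else m)
    else m ++ [p]
  | none => m ++ [p]

-- A's step functions, named for the proofs (definitionally the lambdas of the port)
def pvAclassStep (proteome prot : String) (hq_positions : List Int)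
    (acc3 : PySem.Dict String (List String))
    (lc : String × List (String × List (String × List (Int × Int)))) :
    PySem.Dict String (List String) :=
  match (PySem.Dict.mk lc.2).get? proteome with
  | none => acc3
  | some pm =>
    match (PySem.Dict.mk pm).get? prot with
    | none => acc3
    | some qlist =>
      let q_only := qlist.foldl (fun q qb =>
        q ++ (PySem.List.pyRange qb.1 (qb.2 + 1) 1).filter
              (fun x => !(hq_positions.contains x))) []
      if q_only.length > 20 then
        acc3.modify proteome [] (fun s => PySem.Set.add s prot)
      else acc3

def pvAstep (allQ_df : List (String × List (String × List (String × List (Int × Int)))))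
    (acc : PySem.Dict String (List String)) (pr : String × List (String × List (Int × Int))) :
    PySem.Dict String (List String) :=
  pr.2.foldl (fun acc2 pp =>
    allQ_df.foldl
      (pvAclassStep pr.1 pp.1 (pp.2.foldl (fun h b => h ++ PySem.List.pyRange b.1 (b.2 + 1) 1) []))
      acc2)
    (acc.insert pr.1 (acc.getD pr.1 []))

theorem pv_A_eq (hq_df : List (String × List (String × List (Int × Int))))
    (allQ_df : List (String × List (String × List (String × List (Int × Int))))) :
    crosscheck_bounds hq_df allQ_df = (hq_df.foldl (pvAstep allQ_df) (PySem.Dict.mk [])).items := rfl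

theorem pv_mem_positions (bounds : List (Int × Int)) (x : Int) :
    (x ∈ bounds.foldl (fun h b => h ++ PySem.List.pyRange b.1 (b.2 + 1) 1) []) ↔
      ∃ p ∈ bounds, p.1 ≤ x ∧ x ≤ p.2 := by
  rw [PySem.List.foldl_append_eq_flatMap]
  simp only [List.nil_append, List.mem_flatMap, PySem.List.mem_pyRange_one]
  exact exists_congr fun p => and_congr_right fun _ => and_congr_right fun _ => by omega

theorem pv_merge_fold (S : List (Int × Int)) :
    ∀ (m : List (Int × Int)), pvGood m → (∀ p ∈ S, p.1 ≤ p.2) →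
    S.Pairwise (fun p q => p.1 ≤ q.1) → (∀ p ∈ m, ∀ q ∈ S, p.1 ≤ q.1) →
    pvGood (S.foldl pvMergeStep m) ∧
      (∀ x, pvInU x (S.foldl pvMergeStep m) ↔ pvInU x m ∨ pvInU x S) := by
  induction S with
  | nil => intro m hg _ _ _; exact ⟨hg, fun x => by simp [pvInU]⟩
  | cons a t ih =>
    intro m hg hval hpw hord
    rw [List.pairwise_cons] at hpw
    have hval' : ∀ p ∈ t, p.1 ≤ p.2 := fun p hp => hval p (List.mem_cons_of_mem _ hp)
    have haval : a.1 ≤ a.2 := hval a (List.mem_cons_self ..)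
    simp only [List.foldl_cons]
    have key : pvGood (pvMergeStep m a) ∧ (∀ x, pvInU x (pvMergeStep m a) ↔ pvInU x m ∨ (a.1 ≤ x ∧ x ≤ a.2)) ∧
        (∀ p ∈ pvMergeStep m a, ∀ q ∈ t, p.1 ≤ q.1) := by
      rcases List.eq_nil_or_concat m with hm | ⟨init, q, hm⟩
      · subst hm
        have hstep : pvMergeStep [] a = [a] := by simp [pvMergeStep]
        rw [hstep]
        refine ⟨⟨by simp, ?_⟩, fun x => by simp [pvInU], ?_⟩
        · intro p hp; simp at hp; subst hp; exact haval
        · intro p hp qq hqq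
          simp at hp; subst hp
          exact hpw.1 qq hqq
      · rw [List.concat_eq_append] at hm
        subst hm
        have hqlast : (init ++ [q]).getLast? = some q := by simp
        have hqval : q.1 ≤ q.2 := hg.2 q (by simp)
        have hqord : q.1 ≤ a.1 := hord q (by simp) a (List.mem_cons_self ..)
        have hinit_gap : ∀ p ∈ init, p.2 + 1 < q.1 := by
          have := hg.1
          rw [List.pairwise_append] at this
          intro p hp; exact this.2.2 p hp q (by simp)
        simp only [pvMergeStep, hqlast]
        by_cases h1 : a.1 ≤ q.2 + 1
        · by_cases h2 : q.2 < a.2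
          · simp only [h1, h2, if_true, List.dropLast_concat]
            refine ⟨⟨?_, ?_⟩, ?_, ?_⟩
            · rw [List.pairwise_append]
              have := hg.1; rw [List.pairwise_append] at this
              exact ⟨this.1, by simp, fun p hp qq hqq => by simp at hqq; subst hqq; exact hinit_gap p hp⟩
            · intro p hp
              rcases List.mem_append.1 hp with hp | hp
              · exact hg.2 p (by simp [hp])
              · simp at hp; subst hp; omega
            · intro x
              constructor
              · rintro ⟨p, hp, hx1, hx2⟩
                rcases List.mem_append.1 hp with hp | hp
                · exact Or.inl ⟨p, by simp [hp], hx1, hx2⟩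
                · simp at hp; subst hp
                  by_cases hxq : x ≤ q.2
                  · exact Or.inl ⟨q, by simp, hx1, hxq⟩
                  · exact Or.inr ⟨by omega, hx2⟩
              · rintro (⟨p, hp, hx1, hx2⟩ | ⟨hx1, hx2⟩)
                · rcases List.mem_append.1 hp with hp | hp
                  · exact ⟨p, by simp [hp], hx1, hx2⟩
                  · simp at hp; rw [hp] at hx1 hx2; exact ⟨(q.1, a.2), by simp, by omega, by omega⟩
                · exact ⟨(q.1, a.2), by simp, by omega, hx2⟩
            · intro p hp qq hqq
              rcases List.mem_append.1 hp with hp | hp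
              · exact hord p (by simp [hp]) qq (List.mem_cons_of_mem _ hqq)
              · simp at hp; rw [hp]
                exact le_trans hqord (hpw.1 qq hqq)
          · simp only [h1, h2, if_true, if_false]
            refine ⟨hg, ?_, fun p hp qq hqq => hord p hp qq (List.mem_cons_of_mem _ hqq)⟩
            intro x
            constructor
            · exact Or.inl
            · rintro (h | ⟨hx1, hx2⟩)
              · exact h
              · exact ⟨q, by simp, by omega, by omega⟩
        · simp only [h1, if_false]
          refine ⟨⟨?_, ?_⟩, ?_, ?_⟩
          · rw [List.pairwise_append]
            refine ⟨hg.1, by simp, ?_⟩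
            intro p hp qq hqq
            simp at hqq; subst hqq
            rcases List.mem_append.1 hp with hp | hp
            · have := hinit_gap p hp; omega
            · simp at hp; subst hp; omega
          · intro p hp
            rcases List.mem_append.1 hp with hp | hp
            · exact hg.2 p hp
            · simp at hp; subst hp; exact haval
          · intro x
            constructor
            · rintro ⟨p, hp, hx1, hx2⟩
              rcases List.mem_append.1 hp with hp | hp
              · exact Or.inl ⟨p, hp, hx1, hx2⟩
              · simp at hp; subst hp; exact Or.inr ⟨hx1, hx2⟩
            · rintro (⟨p, hp, hx1, hx2⟩ | ⟨hx1, hx2⟩)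
              · exact ⟨p, List.mem_append.2 (Or.inl hp), hx1, hx2⟩
              · exact ⟨a, by simp, hx1, hx2⟩
          · intro p hp qq hqq
            rcases List.mem_append.1 hp with hp | hp
            · exact hord p hp qq (List.mem_cons_of_mem _ hqq)
            · simp at hp; subst hp; exact hpw.1 qq hqq
    obtain ⟨kg, kmem, kord⟩ := key
    obtain ⟨rg, rmem⟩ := ih (pvMergeStep m a) kg hval' hpw.2 kord
    refine ⟨rg, fun x => ?_⟩
    rw [rmem x, kmem x]
    simp only [pvInU, List.mem_cons]
    constructor
    · rintro ((h | h) | ⟨p, hp, h1, h2⟩)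
      · exact Or.inl h
      · exact Or.inr ⟨a, Or.inl rfl, h⟩
      · exact Or.inr ⟨p, Or.inr hp, h1, h2⟩
    · rintro (h | ⟨p, hp | hp, h1, h2⟩)
      · exact Or.inl (Or.inl h)
      · subst hp; exact Or.inl (Or.inr ⟨h1, h2⟩)
      · exact Or.inr ⟨p, hp, h1, h2⟩

theorem pv_merged_eq_fold (bounds : List (Int × Int)) :
    pvMerged bounds =
      (PySem.List.sorted (bounds.filter (fun p => decide (p.1 ≤ p.2))) (fun p => p.1) false).foldl
        pvMergeStep [] := rfl

theorem pv_merged_spec (bounds : List (Int × Int)) :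
    pvGood (pvMerged bounds) ∧
      ∀ x, pvInU x (pvMerged bounds) ↔ ∃ p ∈ bounds, p.1 ≤ x ∧ x ≤ p.2 := by
  have hval : ∀ p ∈ PySem.List.sorted (bounds.filter (fun p => decide (p.1 ≤ p.2))) (fun p => p.1) false, p.1 ≤ p.2 := by
    intro p hp
    rw [PySem.List.mem_sorted] at hp
    simpa using (List.mem_filter.1 hp).2
  have hpw := PySem.List.sorted_pairwise (xs := bounds.filter (fun p => decide (p.1 ≤ p.2))) (key := fun p => p.1)
  have h := pv_merge_fold
    (PySem.List.sorted (bounds.filter (fun p => decide (p.1 ≤ p.2))) (fun p => p.1) false)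
    [] ⟨by simp, by simp⟩ hval hpw (by simp)
  rw [← pv_merged_eq_fold] at h
  refine ⟨h.1, fun x => ?_⟩
  rw [h.2 x]
  constructor
  · rintro (⟨p, hp, _⟩ | ⟨p, hp, h1, h2⟩)
    · simp at hp
    · rw [PySem.List.mem_sorted] at hp
      exact ⟨p, (List.mem_filter.1 hp).1, h1, h2⟩
  · rintro ⟨p, hp, h1, h2⟩
    refine Or.inr ⟨p, ?_, h1, h2⟩
    rw [PySem.List.mem_sorted, List.mem_filter]
    exact ⟨hp, by simp; omega⟩

theorem pv_count_range_inter (a b c d : Int) :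
    (PySem.List.pyRange a (b + 1) 1).countP (fun x => decide (c ≤ x ∧ x ≤ d)) =
      (min b d + 1 - max a c).toNat := by
  by_cases h : b + 1 ≤ a
  · rw [PySem.List.pyRange_one_eq_nil h]; simp; omega
  · rw [PySem.List.pyRange_one_cons (by omega), List.countP_cons]
    have ih := pv_count_range_inter (a + 1) b c d
    rw [ih]
    by_cases hc : c ≤ a ∧ a ≤ d <;> simp [hc] <;> omega
termination_by (b + 1 - a).toNat
decreasing_by omega

theorem pv_countP_or (l : List Int) (p q : Int → Bool) (h : ∀ x ∈ l, ¬(p x = true ∧ q x = true)) :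
    l.countP (fun x => p x || q x) = l.countP p + l.countP q := by
  induction l with
  | nil => simp
  | cons x t ih =>
    simp only [List.countP_cons]
    rw [ih (fun y hy => h y (List.mem_cons_of_mem _ hy))]
    have := h x (List.mem_cons_self ..)
    cases hp : p x <;> cases hq : q x <;> simp_all <;> omega

theorem pv_countP_union (M : List (Int × Int)) (hM : pvGood M) (l : List Int) :
    l.countP (fun x => M.any (fun p => decide (p.1 ≤ x ∧ x ≤ p.2))) =
      (M.map (fun p => l.countP (fun x => decide (p.1 ≤ x ∧ x ≤ p.2)))).sum := by
  obtain ⟨hpw, hval⟩ := hM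
  induction M with
  | nil => simp
  | cons r t ih =>
    rw [List.pairwise_cons] at hpw
    simp only [List.map_cons, List.sum_cons, List.any_cons]
    rw [← ih hpw.2 (fun p hp => hval p (List.mem_cons_of_mem _ hp))]
    rw [pv_countP_or]
    intro x _ ⟨h1, h2⟩
    simp only [decide_eq_true_eq, List.any_eq_true] at h1 h2
    obtain ⟨q, hq, hq1, hq2⟩ := h2
    have := hpw.1 q hq
    omega

theorem pv_countP_not (l : List Int) (p : Int → Bool) :
    l.countP (fun x => !(p x)) + l.countP p = l.length := by
  induction l with
  | nil => simp
  | cons x t ih => simp only [List.countP_cons]; cases h : p x <;> simp <;> omega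

theorem pv_sum_toNat_filter (M : List (Int × Int)) (hval : ∀ p ∈ M, p.1 ≤ p.2)
    (a b : Int) (hab : a ≤ b) :
    ((M.map (fun p => (min b p.2 + 1 - max a p.1).toNat)).sum : Int)
    = ((M.filter (fun p => decide (p.1 ≤ b ∧ a ≤ p.2))).map
        (fun p => min b p.2 - max a p.1 + 1)).sum := by
  induction M with
  | nil => simp
  | cons p t ih =>
    have hv := hval p (List.mem_cons_self ..)
    have iht := ih (fun q hq => hval q (List.mem_cons_of_mem _ hq))
    by_cases hc : p.1 ≤ b ∧ a ≤ p.2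
    · simp only [List.map_cons, List.sum_cons, List.filter_cons, hc, decide_true, and_self,
        if_true, Nat.cast_add]
      rw [iht]
      omega
    · have hz : (min b p.2 + 1 - max a p.1).toNat = 0 := by omega
      simp only [List.map_cons, List.sum_cons, List.filter_cons, hz, zero_add]
      rw [iht]
      simp [hc]

-- A's per-Q-interval count equals B's interval arithmetic
theorem pv_qb_count (bounds : List (Int × Int)) (a b : Int) :
    ((((PySem.List.pyRange a (b + 1) 1).filter
        (fun x => !((bounds.foldl (fun h bd => h ++ PySem.List.pyRange bd.1 (bd.2 + 1) 1) []).contains x))).length : Nat) : Int)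
    = (if a ≤ b then (b - a + 1) -
        (((pvMerged bounds).filter (fun p => decide (p.1 ≤ b ∧ a ≤ p.2))).map
          (fun p => min b p.2 - max a p.1 + 1)).sum
       else 0) := by
  by_cases hab : a ≤ b
  · simp only [hab, if_true]
    rw [← List.countP_eq_length_filter]
    have hnot := pv_countP_not (PySem.List.pyRange a (b + 1) 1)
      (fun x => (bounds.foldl (fun h bd => h ++ PySem.List.pyRange bd.1 (bd.2 + 1) 1) []).contains x)
    have hlen : (PySem.List.pyRange a (b + 1) 1).length = (b + 1 - a).toNat :=
      PySem.List.length_pyRange_one a (b + 1)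
    have hcong : (PySem.List.pyRange a (b + 1) 1).countP
        (fun x => (bounds.foldl (fun h bd => h ++ PySem.List.pyRange bd.1 (bd.2 + 1) 1) []).contains x)
      = (PySem.List.pyRange a (b + 1) 1).countP
        (fun x => (pvMerged bounds).any (fun p => decide (p.1 ≤ x ∧ x ≤ p.2))) := by
      apply List.countP_congr
      intro x _
      have h1 : ((bounds.foldl (fun h bd => h ++ PySem.List.pyRange bd.1 (bd.2 + 1) 1) []).contains x) = true ↔
          ∃ p ∈ bounds, p.1 ≤ x ∧ x ≤ p.2 :=
        List.contains_iff_mem.trans (pv_mem_positions bounds x)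
      have h2 : ((pvMerged bounds).any (fun p => decide (p.1 ≤ x ∧ x ≤ p.2))) = true ↔
          ∃ p ∈ bounds, p.1 ≤ x ∧ x ≤ p.2 := by
        rw [List.any_eq_true]
        simp only [decide_eq_true_eq]
        exact (pv_merged_spec bounds).2 x
      rw [h1, h2]
    have hUnion := pv_countP_union (pvMerged bounds) (pv_merged_spec bounds).1
      (PySem.List.pyRange a (b + 1) 1)
    have hInter : (pvMerged bounds).map
        (fun p => (PySem.List.pyRange a (b + 1) 1).countP (fun x => decide (p.1 ≤ x ∧ x ≤ p.2)))
      = (pvMerged bounds).map (fun p => (min b p.2 + 1 - max a p.1).toNat) := by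
      apply List.map_congr_left
      intro p _
      exact pv_count_range_inter a b p.1 p.2
    rw [hcong, hUnion, hInter] at hnot
    have hsum := pv_sum_toNat_filter (pvMerged bounds) (pv_merged_spec bounds).1.2 a b hab
    omega
  · rw [PySem.List.pyRange_one_eq_nil (by omega)]
    simp [hab]

theorem pv_foldl_sub (l : List (Int × Int)) (g : Int × Int → Int) (t0 : Int) :
    l.foldl (fun t p => t - g p) t0 = t0 - (l.map g).sum := by
  induction l generalizing t0 with
  | nil => simp
  | cons p t ih => simp only [List.foldl_cons, List.map_cons, List.sum_cons, ih]; ring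

-- B's per-protein inner loop equals the sum of per-interval values
theorem pv_total_eq (M : List (Int × Int)) (qlist : List (Int × Int)) :
    qlist.foldl (fun total qb =>
      if qb.1 ≤ qb.2 then
        M.foldl (fun t p =>
          if p.1 ≤ qb.2 ∧ qb.1 ≤ p.2 then t - (min qb.2 p.2 - max qb.1 p.1 + 1) else t)
          (total + (qb.2 - qb.1 + 1))
      else total) (0 : Int)
    = (qlist.map (fun qb => if qb.1 ≤ qb.2 then (qb.2 - qb.1 + 1) -
        ((M.filter (fun p => decide (p.1 ≤ qb.2 ∧ qb.1 ≤ p.2))).map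
          (fun p => min qb.2 p.2 - max qb.1 p.1 + 1)).sum else 0)).sum := by
  have h1 := PySem.List.foldl_congr_mem (l := qlist) (init := (0 : Int))
    (g := fun acc qb => acc + (if qb.1 ≤ qb.2 then (qb.2 - qb.1 + 1) -
        ((M.filter (fun p => decide (p.1 ≤ qb.2 ∧ qb.1 ≤ p.2))).map
          (fun p => min qb.2 p.2 - max qb.1 p.1 + 1)).sum else 0))
    (f := fun total qb =>
      if qb.1 ≤ qb.2 then
        M.foldl (fun t p =>
          if p.1 ≤ qb.2 ∧ qb.1 ≤ p.2 then t - (min qb.2 p.2 - max qb.1 p.1 + 1) else t)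
          (total + (qb.2 - qb.1 + 1))
      else total)
    (by
      intro acc qb _
      by_cases h : qb.1 ≤ qb.2
      · simp only [h, if_true]
        rw [PySem.List.foldl_ite_eq_foldl_filter, pv_foldl_sub]
        ring
      · simp [h])
  rw [h1, PySem.List.foldl_add]
  simp

theorem pv_len_flat (qlist : List (Int × Int)) (f : Int × Int → List Int) :
    ((qlist.foldl (fun q qb => q ++ f qb) []).length : Int)
    = (qlist.map (fun qb => ((f qb).length : Int))).sum := by
  rw [PySem.List.foldl_append_eq_flatMap]
  simp only [List.nil_append, List.length_flatMap]
  rw [Nat.cast_list_sum, List.map_map]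
  rfl

-- A's q_only length equals B's running total, for one (proteome, prot, class) triple
theorem pv_len_eq_total (bounds qlist : List (Int × Int)) :
    (((qlist.foldl (fun q qb =>
        q ++ (PySem.List.pyRange qb.1 (qb.2 + 1) 1).filter
          (fun x => !((bounds.foldl (fun h b => h ++ PySem.List.pyRange b.1 (b.2 + 1) 1) []).contains x))) []).length : Nat) : Int)
    = qlist.foldl (fun total qb =>
        if qb.1 ≤ qb.2 then
          (pvMerged bounds).foldl (fun t p =>
            if p.1 ≤ qb.2 ∧ qb.1 ≤ p.2 then t - (min qb.2 p.2 - max qb.1 p.1 + 1) else t)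
            (total + (qb.2 - qb.1 + 1))
        else total) (0 : Int) := by
  rw [pv_len_flat, pv_total_eq]
  apply congrArg
  apply List.map_congr_left
  intro qb _
  exact pv_qb_count bounds qb.1 qb.2

-- dict plumbing: lookups and modification at a key sitting last with fresh prefix
theorem pv_get?_concat {ν : Type} (base : List (String × ν)) (k : String) (v : ν)
    (h : ∀ p ∈ base, p.1 ≠ k) :
    (PySem.Dict.mk (base ++ [(k, v)])).get? k = some v := by
  induction base with
  | nil => simp [PySem.Dict.get?]
  | cons p t ih =>
    have hp := h p (List.mem_cons_self ..)
    rw [List.cons_append, PySem.Dict.get?_mk_cons, if_neg (by simp [hp])]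
    exact ih (fun q hq => h q (List.mem_cons_of_mem _ hq))

theorem pv_modify_concat {ν : Type} (base : List (String × ν)) (k : String) (v : ν)
    (dflt : ν) (f : ν → ν) (h : ∀ p ∈ base, p.1 ≠ k) :
    (PySem.Dict.mk (base ++ [(k, v)])).modify k dflt f = PySem.Dict.mk (base ++ [(k, f v)]) := by
  have hget := pv_get?_concat base k v h
  have hcont : (PySem.Dict.mk (base ++ [(k, v)])).contains k = true := by
    rw [PySem.Dict.contains_eq_isSome_get?, hget]; rfl
  unfold PySem.Dict.modify
  rw [PySem.Dict.getD_eq_get?_getD, hget]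
  unfold PySem.Dict.insert
  rw [hcont]
  simp only [if_true]
  congr 1
  rw [List.map_append]
  congr 1
  · conv_rhs => rw [← List.map_id base]
    apply List.map_congr_left
    intro p hp
    simp [h p hp]
  · simp

-- one class step of A, with the inner lookup abstracted
theorem pv_class_step_aux (proteome prot : String) (bounds : List (Int × Int))
    (acc : PySem.Dict String (List String)) (o : Option (List (Int × Int))) :
    (match o with
     | none => acc
     | some qlist =>
       let q_only := qlist.foldl (fun q qb =>
         q ++ (PySem.List.pyRange qb.1 (qb.2 + 1) 1).filter
           (fun x => !((bounds.foldl (fun h b => h ++ PySem.List.pyRange b.1 (b.2 + 1) 1) []).contains x))) []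
       if q_only.length > 20 then acc.modify proteome [] (fun s => PySem.Set.add s prot) else acc)
    = if (match o with
          | none => false
          | some qlist =>
            decide (20 < qlist.foldl (fun total qb =>
              if qb.1 ≤ qb.2 then
                (pvMerged bounds).foldl (fun t p =>
                  if p.1 ≤ qb.2 ∧ qb.1 ≤ p.2 then t - (min qb.2 p.2 - max qb.1 p.1 + 1) else t)
                  (total + (qb.2 - qb.1 + 1))
              else total) (0 : Int))) = true then
        acc.modify proteome [] (fun s => PySem.Set.add s prot)
      else acc := by
  rcases o with _ | qlist
  · simp
  · simp only [decide_eq_true_eq]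
    have hlen := pv_len_eq_total bounds qlist
    have hiff : ((qlist.foldl (fun q qb =>
        q ++ (PySem.List.pyRange qb.1 (qb.2 + 1) 1).filter
          (fun x => !((bounds.foldl (fun h b => h ++ PySem.List.pyRange b.1 (b.2 + 1) 1) []).contains x))) []).length > 20)
      ↔ (20 < qlist.foldl (fun total qb =>
          if qb.1 ≤ qb.2 then
            (pvMerged bounds).foldl (fun t p =>
              if p.1 ≤ qb.2 ∧ qb.1 ≤ p.2 then t - (min qb.2 p.2 - max qb.1 p.1 + 1) else t)
            (total + (qb.2 - qb.1 + 1))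
          else total) (0 : Int)) := by
      rw [← hlen]
      omega
    rw [if_congr hiff rfl rfl]

-- A's class loop for one protein applies "add prot" iff some class qualifies
theorem pv_class_fold (proteome prot : String) (bounds : List (Int × Int))
    (allQ_df : List (String × List (String × List (String × List (Int × Int))))) :
    ∀ acc, allQ_df.foldl
      (pvAclassStep proteome prot (bounds.foldl (fun h b => h ++ PySem.List.pyRange b.1 (b.2 + 1) 1) []))
      acc
    = if pvHasLongNonHQ proteome prot (pvMerged bounds) allQ_df then
        acc.modify proteome [] (fun s => PySem.Set.add s prot)
      else acc := by
  induction allQ_df with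
  | nil => intro acc; simp [pvHasLongNonHQ]
  | cons lc t ih =>
    intro acc
    have hstep : pvAclassStep proteome prot
        (bounds.foldl (fun h b => h ++ PySem.List.pyRange b.1 (b.2 + 1) 1) []) acc lc
      = if (match (PySem.Dict.mk lc.2).get? proteome with
            | none => false
            | some pm =>
              match (PySem.Dict.mk pm).get? prot with
              | none => false
              | some qlist =>
                decide (20 < qlist.foldl (fun total qb =>
                  if qb.1 ≤ qb.2 then
                    (pvMerged bounds).foldl (fun t p =>
                      if p.1 ≤ qb.2 ∧ qb.1 ≤ p.2 then t - (min qb.2 p.2 - max qb.1 p.1 + 1) else t)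
                      (total + (qb.2 - qb.1 + 1))
                  else total) (0 : Int))) = true then
          acc.modify proteome [] (fun s => PySem.Set.add s prot)
        else acc := by
      unfold pvAclassStep
      rcases (PySem.Dict.mk lc.2).get? proteome with _ | pm
      · simp
      · exact pv_class_step_aux proteome prot bounds acc ((PySem.Dict.mk pm).get? prot)
    rw [List.foldl_cons, hstep]
    by_cases hc : (match (PySem.Dict.mk lc.2).get? proteome with
        | none => false
        | some pm =>
          match (PySem.Dict.mk pm).get? prot with
          | none => false
          | some qlist =>
            decide (20 < qlist.foldl (fun total qb =>
              if qb.1 ≤ qb.2 then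
                (pvMerged bounds).foldl (fun t p =>
                  if p.1 ≤ qb.2 ∧ qb.1 ≤ p.2 then t - (min qb.2 p.2 - max qb.1 p.1 + 1) else t)
                  (total + (qb.2 - qb.1 + 1))
              else total) (0 : Int))) = true
    · rw [if_pos hc, ih]
      have hany : pvHasLongNonHQ proteome prot (pvMerged bounds) (lc :: t) = true := by
        unfold pvHasLongNonHQ
        rw [List.any_cons]
        exact Bool.or_eq_true_iff.2 (Or.inl hc)
      rw [if_pos hany]
      by_cases ht : pvHasLongNonHQ proteome prot (pvMerged bounds) t
      · rw [if_pos ht]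
        unfold PySem.Dict.modify
        rw [PySem.Dict.getD_insert_self, PySem.Dict.insert_insert_self]
        congr 1
        exact PySem.Set.add_of_mem ((PySem.Set.mem_add _ _ _).2 (Or.inr rfl))
      · rw [if_neg ht]
    · rw [if_neg hc, ih]
      unfold pvHasLongNonHQ
      rw [List.any_cons]
      simp only [Bool.eq_false_iff.2 hc, Bool.false_or]

-- A's protein loop for one proteome appends exactly the qualifying protein names
theorem pv_prot_fold (k : String)
    (allQ_df : List (String × List (String × List (String × List (Int × Int)))))
    (prots : List (String × List (Int × Int))) :
    ∀ (base : List (String × List String)) (s : List String),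
    (∀ p ∈ base, p.1 ≠ k) → (∀ pp ∈ prots, pp.1 ∉ s) → (prots.map (·.1)).Nodup →
    prots.foldl (fun acc2 pp =>
        allQ_df.foldl
          (pvAclassStep k pp.1 (pp.2.foldl (fun h b => h ++ PySem.List.pyRange b.1 (b.2 + 1) 1) []))
          acc2)
      (PySem.Dict.mk (base ++ [(k, s)]))
    = PySem.Dict.mk (base ++ [(k, s ++
        (prots.filter (fun pp => pvHasLongNonHQ k pp.1 (pvMerged pp.2) allQ_df)).map (·.1))]) := by
  induction prots with
  | nil => intro base s _ _ _; simp
  | cons pp rest ih =>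
    intro base s hbase hs hnd
    rw [List.foldl_cons, pv_class_fold k pp.1 pp.2 allQ_df]
    rw [List.map_cons, List.nodup_cons] at hnd
    by_cases hq : pvHasLongNonHQ k pp.1 (pvMerged pp.2) allQ_df = true
    · rw [if_pos hq, pv_modify_concat base k s [] _ hbase,
        PySem.Set.add_of_not_mem (hs pp (List.mem_cons_self ..))]
      rw [ih base (s ++ [pp.1]) hbase ?fresh hnd.2]
      · simp [hq, List.append_assoc]
      case fresh =>
        intro pp' hpp'
        simp only [List.mem_append, List.mem_singleton]
        rintro (h | h)
        · exact hs pp' (List.mem_cons_of_mem _ hpp') h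
        · exact hnd.1 (h ▸ List.mem_map_of_mem hpp')
    · rw [if_neg hq, ih base s hbase (fun pp' hpp' => hs pp' (List.mem_cons_of_mem _ hpp')) hnd.2]
      simp [hq]

-- the outer loop builds exactly B's per-proteome entries
theorem pv_outer
    (allQ_df : List (String × List (String × List (String × List (Int × Int)))))
    (L : List (String × List (String × List (Int × Int)))) :
    ∀ (acc : PySem.Dict String (List String)),
    (∀ pr ∈ L, ∀ p ∈ acc.items, p.1 ≠ pr.1) → (L.map (·.1)).Nodup →
    (∀ pr ∈ L, (pr.2.map (·.1)).Nodup) →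
    (L.foldl (pvAstep allQ_df) acc).items = acc.items ++
      L.map (fun pr => (pr.1, PySem.Set.ofList ((pr.2.filter
        (fun pp => pvHasLongNonHQ pr.1 pp.1 (pvMerged pp.2) allQ_df)).map (·.1)))) := by
  induction L with
  | nil => intro acc _ _ _; simp
  | cons pr rest ih =>
    intro acc hfresh hnd hprots
    rw [List.map_cons, List.nodup_cons] at hnd
    have hnc : acc.contains pr.1 = false := by
      rw [← Bool.not_eq_true, PySem.Dict.contains_iff_mem_keys]
      intro hk
      unfold PySem.Dict.keys at hk
      obtain ⟨p, hp, hpk⟩ := List.mem_map.1 hk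
      exact hfresh pr (List.mem_cons_self ..) p hp hpk
    have hins : acc.insert pr.1 (acc.getD pr.1 []) = PySem.Dict.mk (acc.items ++ [(pr.1, [])]) := by
      apply PySem.Dict.ext
      rw [PySem.Dict.items_insert_of_not_contains _ _ hnc]
      rw [PySem.Dict.getD_of_not_contains _ _ hnc]
    have hflist : ((pr.2.filter
        (fun pp => pvHasLongNonHQ pr.1 pp.1 (pvMerged pp.2) allQ_df)).map (·.1)).Nodup := by
      refine List.Nodup.sublist ?_ (hprots pr (List.mem_cons_self ..))
      exact List.Sublist.map _ List.filter_sublist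
    have hstep : pvAstep allQ_df acc pr = PySem.Dict.mk (acc.items ++ [(pr.1,
        (pr.2.filter (fun pp => pvHasLongNonHQ pr.1 pp.1 (pvMerged pp.2) allQ_df)).map (·.1))]) := by
      unfold pvAstep
      rw [hins, pv_prot_fold pr.1 allQ_df pr.2 acc.items []
        (fun p hp => hfresh pr (List.mem_cons_self ..) p hp) (by simp) (hprots pr (List.mem_cons_self ..))]
      simp
    rw [List.foldl_cons, hstep, ih _ ?fresh hnd.2 (fun q hq => hprots q (List.mem_cons_of_mem _ hq))]
    · simp only [List.map_cons]
      rw [PySem.Set.ofList_eq_self_of_nodup _ hflist]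
      simp [List.append_assoc]
    case fresh =>
      intro pr' hpr' p hp
      simp only [List.mem_append, List.mem_singleton] at hp
      rcases hp with hp | hp
      · exact hfresh pr' (List.mem_cons_of_mem _ hpr') p hp
      · rw [hp]
        intro hk
        exact hnd.1 (hk ▸ List.mem_map_of_mem hpr')

-- ===== VERDICT (by name: the statement is the Claim_ definition above) =====
theorem crosscheck_bounds_spec : Claim_equal_crosscheck_bounds := by
  intro hq_df allQ_df _ hpre
  unfold Spec_crosscheck_bounds
  rw [pv_A_eq, pv_outer allQ_df hq_df (PySem.Dict.mk []) (by intro _ _ p hp; simp at hp)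
    hpre.1 hpre.2.1]
  rfl
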